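-- pv_equiv track=rewrite | github.com/skuxy/Advent-Of-Code-codes | 2017/day9.py | eliminate_comments
-- ===== SOURCE A (Python) =====
-- def eliminate_comments(stream):
--     index = 0
--     stream = list(stream)
--     while index < len(stream):
--         if stream[index] == '!':
--             stream.pop(index)
--             stream.pop(index)
--             index -= 1
--
--         index += 1
--     return ''.join(stream)
-- ===== SOURCE B (Python) =====
-- def eliminate_comments(stream):
--     out = []
--     it = iter(stream)
--     for c in it:
--         if c == '!':
--             next(it, None)  # skip the escaped character (nothing to skip at end of stream)
--         else:
--             out.append(c)
--     return ''.join(out)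
-- ===== Notes on version B (the rewrite author's own statement) =====
-- stated objective: faster
-- what changed: Replaces A's in-place list.pop scanning loop (each pop shifts the tail) with a single left-to-right pass that skips the character after each '!' and appends kept characters to an output list.
import Mathlib
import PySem

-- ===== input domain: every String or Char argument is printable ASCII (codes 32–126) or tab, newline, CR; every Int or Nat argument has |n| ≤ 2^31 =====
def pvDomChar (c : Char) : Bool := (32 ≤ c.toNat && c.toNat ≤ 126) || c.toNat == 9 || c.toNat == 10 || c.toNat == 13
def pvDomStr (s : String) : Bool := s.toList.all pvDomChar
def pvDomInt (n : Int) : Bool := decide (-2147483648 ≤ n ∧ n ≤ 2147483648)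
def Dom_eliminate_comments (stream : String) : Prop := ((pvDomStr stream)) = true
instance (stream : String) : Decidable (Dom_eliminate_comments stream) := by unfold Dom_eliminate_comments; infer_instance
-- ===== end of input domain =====

-- B replaces A's in-place pop-and-shift loop with a single linear pass that skips the
-- character after each '!' (objective: faster).

-- ===== PORT A =====
-- the while loop over the mutable list; after the two pops Python does
-- 'index -= 1; index += 1', i.e. index is unchanged, so the recursive call keeps index.
def eliminateCommentsLoopA (l : List Char) (index : Nat) : List Char :=
  if h : index < l.length then
    if l[index] == '!' then
      match h1 : PySem.List.pop? l (index : Int) with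
      | none => l            -- unreachable: index is in range
      | some (_, l1) =>
        match h2 : PySem.List.pop? l1 (index : Int) with
        | none => l1         -- Python raises IndexError here (excluded by Pre_)
        | some (_, l2) => eliminateCommentsLoopA l2 index
    else
      eliminateCommentsLoopA l (index + 1)
  else
    l
termination_by l.length - index
decreasing_by
  · have e1 : l1.length + 1 = l.length := PySem.List.length_of_pop?_eq_some _ h1
    have e2 : l2.length + 1 = l1.length := PySem.List.length_of_pop?_eq_some _ h2
    omega
  · omega

def eliminate_comments (stream : String) : String :=
  String.mk (eliminateCommentsLoopA stream.toList 0)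

-- ===== PORT B =====
-- single pass: a '!' consumes the next character (if any), everything else is kept.
def eliminateCommentsLoopB : List Char → List Char
  | [] => []
  | c :: rest =>
    if c == '!' then
      match rest with
      | [] => []
      | _ :: rest' => eliminateCommentsLoopB rest'
    else
      c :: eliminateCommentsLoopB rest

def eliminate_comments_alt (stream : String) : String :=
  String.mk (eliminateCommentsLoopB stream.toList)

-- ===== PRECONDITION & SPEC =====
-- Pre_ excludes exactly the strings ending in an odd-length run of '!', on which
-- Python A raises IndexError (the second pop falls off the end of the list).
def Pre_eliminate_comments (stream : String) : Prop :=
  (stream.toList.reverse.takeWhile (fun c => c == '!')).length % 2 = 0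
instance (stream : String) : Decidable (Pre_eliminate_comments stream) := by
  unfold Pre_eliminate_comments; infer_instance

def pvWitness_eliminate_comments : String := "ab!!c"

def Spec_eliminate_comments (stream : String) (out : String) : Prop := out = eliminate_comments_alt stream
instance (stream : String) (out : String) : Decidable (Spec_eliminate_comments stream out) := by unfold Spec_eliminate_comments; infer_instance

-- ===== CLAIM (what is proved, stated in full; the proofs are below) =====
def Claim_equal_eliminate_comments : Prop := ∀ (stream : String), Dom_eliminate_comments stream → Pre_eliminate_comments stream → Spec_eliminate_comments stream (eliminate_comments stream)

-- ===== LEMMAS AND PROOFS =====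

-- length of the trailing run of '!' characters
def pvTrail (l : List Char) : Nat := (l.reverse.takeWhile (fun c => c == '!')).length

theorem pvTrail_all (l : List Char) (h : l.all (fun x => x == '!')) : pvTrail l = l.length := by
  simp only [pvTrail]
  rw [List.takeWhile_eq_self_iff.mpr (fun x hx => List.all_eq_true.mp h x (List.mem_reverse.mp hx)),
    List.length_reverse]

theorem pvTrail_cons (c : Char) (l : List Char) :
    pvTrail (c :: l) =
      if l.all (fun x => x == '!') then l.length + (if c == '!' then 1 else 0)
      else pvTrail l := by
  have hpre := List.takeWhile_prefix (p := fun x => x == '!') (l := l.reverse)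
  simp only [pvTrail, List.reverse_cons, List.takeWhile_append]
  by_cases hall : l.all (fun x => x == '!')
  · have ht : l.reverse.takeWhile (fun x => x == '!') = l.reverse :=
      List.takeWhile_eq_self_iff.mpr (fun x hx => List.all_eq_true.mp hall x (List.mem_reverse.mp hx))
    rw [ht, if_pos rfl, if_pos hall]
    by_cases hc : c == '!' <;> simp [List.takeWhile, hc]
  · have hne : (l.reverse.takeWhile (fun x => x == '!')).length ≠ l.reverse.length := by
      intro he
      have heq : l.reverse.takeWhile (fun x => x == '!') = l.reverse := hpre.eq_of_length he
      exact hall (List.all_eq_true.mpr (fun x hx =>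
        List.takeWhile_eq_self_iff.mp heq x (List.mem_reverse.mpr hx)))
    rw [if_neg hne, if_neg hall]

theorem pvTrail_parity_cons_ne (c : Char) (l : List Char) (hc : ¬ c = '!') :
    pvTrail (c :: l) % 2 = pvTrail l % 2 := by
  rw [pvTrail_cons]
  by_cases hall : l.all (fun x => x == '!')
  · rw [if_pos hall, if_neg (by simpa using hc), pvTrail_all l hall]
    omega
  · rw [if_neg hall]

theorem pvTrail_parity_bang (d : Char) (l : List Char) :
    pvTrail ('!' :: d :: l) % 2 = pvTrail l % 2 := by
  rw [pvTrail_cons]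
  by_cases hall : (d :: l).all (fun x => x == '!')
  · have hl : l.all (fun x => x == '!') := by
      simp only [List.all_cons, Bool.and_eq_true] at hall
      exact hall.2
    rw [if_pos hall, pvTrail_all l hl]
    simp
    omega
  · rw [if_neg hall, pvTrail_cons]
    by_cases hld : l.all (fun x => x == '!')
    · have hd : ¬ (d == '!') = true := by
        intro hd
        exact hall (by simp [List.all_cons, hd, hld])
      rw [if_pos hld, if_neg hd, pvTrail_all l hld]
      omega
    · rw [if_neg hld]

theorem pvEraseIdxAppendCons {x : Char} {p t : List Char} :
    (p ++ x :: t).eraseIdx p.length = p ++ t := by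
  induction p with
  | nil => rfl
  | cons a p ih => simpa [List.eraseIdx] using ih

theorem pvLoopB_bang (d : Char) (r : List Char) :
    eliminateCommentsLoopB ('!' :: d :: r) = eliminateCommentsLoopB r := rfl

theorem pvLoopB_cons_ne (c : Char) (r : List Char) (hcb : (c == '!') = false) :
    eliminateCommentsLoopB (c :: r) = c :: eliminateCommentsLoopB r := by
  rw [eliminateCommentsLoopB.eq_def]
  simp [hcb]

theorem eliminateCommentsLoopA_eq (n : Nat) :
    ∀ (r p : List Char), r.length ≤ n → pvTrail r % 2 = 0 →
      eliminateCommentsLoopA (p ++ r) p.length = p ++ eliminateCommentsLoopB r := by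
  induction n with
  | zero =>
    intro r p hle _
    have hr : r = [] := List.eq_nil_of_length_eq_zero (by omega)
    subst hr
    rw [eliminateCommentsLoopA]
    simp [eliminateCommentsLoopB]
  | succ n ih =>
    intro r p hle hg
    match r with
    | [] =>
      rw [eliminateCommentsLoopA]
      simp [eliminateCommentsLoopB]
    | c :: rest =>
      have hlt : p.length < (p ++ c :: rest).length := by simp
      have hget : (p ++ c :: rest)[p.length]'hlt = c := by
        rw [List.getElem_append_right (le_refl p.length)]
        simp
      rw [eliminateCommentsLoopA, dif_pos hlt]
      by_cases hc : c = '!'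
      · subst hc
        have hpop1 : PySem.List.pop? (p ++ '!' :: rest) ((p.length : Nat) : Int)
            = some ('!', p ++ rest) := by
          rw [PySem.List.pop?_natCast _ _ hlt, hget, pvEraseIdxAppendCons]
        match rest with
        | [] =>
          exfalso
          have : pvTrail ['!'] % 2 = 1 := by decide
          omega
        | d :: rest' =>
          have hlt2 : p.length < (p ++ d :: rest').length := by simp
          have hget2 : (p ++ d :: rest')[p.length]'hlt2 = d := by
            rw [List.getElem_append_right (le_refl p.length)]
            simp
          have hpop2 : PySem.List.pop? (p ++ d :: rest') ((p.length : Nat) : Int)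
              = some (d, p ++ rest') := by
            rw [PySem.List.pop?_natCast _ _ hlt2, hget2, pvEraseIdxAppendCons]
          have hrec := ih rest' p (by simp at hle ⊢; omega)
            (by rw [← pvTrail_parity_bang d rest']; exact hg)
          rw [hget]
          simp only [BEq.rfl, if_true]
          split
          · rename_i heq
            rw [hpop1] at heq
            cases heq
          · rename_i fst l1 heq
            rw [hpop1] at heq
            injection heq with h3
            cases h3
            split
            · rename_i heq2
              rw [hpop2] at heq2
              cases heq2
            · rename_i fst2 l2 heq2
              rw [hpop2] at heq2
              injection heq2 with h4
              cases h4
              rw [pvLoopB_bang]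
              exact hrec
      · have hcb : (c == '!') = false := by simpa using hc
        rw [hget, hcb]
        simp only [Bool.false_eq_true, if_false]
        have hassoc : p ++ c :: rest = (p ++ [c]) ++ rest := by simp
        have hlen : p.length + 1 = (p ++ [c]).length := by simp
        rw [hassoc, hlen]
        rw [ih rest (p ++ [c]) (by simp at hle ⊢; omega)
          (by rw [← pvTrail_parity_cons_ne c rest hc]; exact hg)]
        rw [pvLoopB_cons_ne c rest hcb]
        simp

-- ===== VERDICT (by name: the statement is the Claim_ definition above) =====
theorem eliminate_comments_spec : Claim_equal_eliminate_comments := by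
  intro stream _ hpre
  unfold Spec_eliminate_comments eliminate_comments eliminate_comments_alt
  have h := eliminateCommentsLoopA_eq stream.toList.length stream.toList [] (le_refl _) hpre
  simp only [List.nil_append, List.length_nil] at h
  exact congrArg String.mk h
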